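-- pv_equiv track=rewrite | github.com/roshhellwett/nf-metro | src/nf_metro/convert.py | _reconnect_edges
-- ===== SOURCE A (Python) =====
-- from collections import defaultdict, deque
--
-- def _reconnect_edges(
--     kept_ids: set[str],
--     all_edges: list[tuple[str, str]],
-- ) -> list[tuple[str, str]]:
--     """Reconnect edges through dropped nodes.
--
--     For each kept node, BFS forward through dropped nodes to find
--     reachable kept nodes, creating direct edges.
--     """
--     successors: dict[str, set[str]] = defaultdict(set)
--     for src, tgt in all_edges:
--         successors[src].add(tgt)
--
--     new_edges: set[tuple[str, str]] = set()
--
--     for src in kept_ids: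
--         # BFS through dropped nodes
--         visited: set[str] = set()
--         queue = deque(successors.get(src, set()))
--         while queue:
--             node = queue.popleft()
--             if node in visited:
--                 continue
--             visited.add(node)
--             if node in kept_ids:
--                 if node != src:  # no self-loops
--                     new_edges.add((src, node))
--                 # Don't continue through kept nodes
--             else:
--                 queue.extend(successors.get(node, set()))
--
--     return sorted(new_edges)
-- ===== SOURCE B (Python) =====
-- def _reconnect_edges(
--     kept_ids: set[str],
--     all_edges: list[tuple[str, str]],
-- ) -> list[tuple[str, str]]:
--     """Reconnect edges through dropped nodes.
--
--     For each kept node, saturate a reachability set to a fixpoint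
--     (round-based chaotic iteration instead of a worklist BFS), then
--     emit direct edges to the kept nodes reached.
--     """
--     succ: dict[str, list[str]] = {}
--     for s, t in all_edges:
--         succ.setdefault(s, []).append(t)
--
--     pairs: set[tuple[str, str]] = set()
--     for src in kept_ids:
--         reach = set(succ.get(src, ()))
--         while True:
--             extra = {t for d in reach if d not in kept_ids
--                        for t in succ.get(d, ())}
--             if extra <= reach:
--                 break
--             reach |= extra
--         pairs.update((src, t) for t in reach if t in kept_ids and t != src)
--     return sorted(pairs)
-- ===== Notes on version B (the rewrite author's own statement) =====
-- stated objective: alternative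
-- what changed: Replaces A's per-source worklist BFS (deque + visited set, emitting edges as nodes are first visited) with a per-source round-based fixpoint saturation of a reachability set, collecting the kept targets only after the set is saturated.
import Mathlib
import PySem

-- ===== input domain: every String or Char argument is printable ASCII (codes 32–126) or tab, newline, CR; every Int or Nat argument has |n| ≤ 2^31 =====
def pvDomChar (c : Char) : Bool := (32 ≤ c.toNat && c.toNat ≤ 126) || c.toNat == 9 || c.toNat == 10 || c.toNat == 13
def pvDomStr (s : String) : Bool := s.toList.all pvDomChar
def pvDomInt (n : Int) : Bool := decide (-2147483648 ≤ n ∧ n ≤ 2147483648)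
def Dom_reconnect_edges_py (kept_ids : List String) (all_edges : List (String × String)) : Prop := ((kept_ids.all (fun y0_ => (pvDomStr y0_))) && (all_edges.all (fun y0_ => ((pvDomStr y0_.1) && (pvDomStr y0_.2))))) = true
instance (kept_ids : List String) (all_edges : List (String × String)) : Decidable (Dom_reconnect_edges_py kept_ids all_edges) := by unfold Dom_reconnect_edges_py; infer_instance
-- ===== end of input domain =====

-- B replaces A's per-source worklist BFS (queue + visited set + on-the-fly edge emission) by a
-- per-source round-based fixpoint saturation of a reachability set; same return value, alternative algorithm.

-- ===== PORT A =====
-- successors: dict[str, set[str]] = defaultdict(set); successors[src].add(tgt)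
def pvSuccA (all_edges : List (String × String)) : PySem.Dict String (PySem.Set String) :=
  all_edges.foldl (fun d e => d.modify e.1 [] (fun s => PySem.Set.add s e.2)) PySem.Dict.empty

-- the BFS 'while queue:' loop; fuel only makes the recursion structural (never exhausted, see pvFuelA)
def pvBfsA (succ : PySem.Dict String (PySem.Set String)) (kept_ids : List String) (src : String) :
    Nat → List String → PySem.Set String → PySem.Set (String × String) →
    PySem.Set String × PySem.Set (String × String)
  | 0, _, visited, acc => (visited, acc)
  | _ + 1, [], visited, acc => (visited, acc)
  | fuel + 1, node :: rest, visited, acc =>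
    if node ∈ visited then
      pvBfsA succ kept_ids src fuel rest visited acc
    else
      if node ∈ kept_ids then
        pvBfsA succ kept_ids src fuel rest (PySem.Set.add visited node)
          (if node ≠ src then PySem.Set.add acc (src, node) else acc)
      else
        pvBfsA succ kept_ids src fuel (rest ++ succ.getD node []) (PySem.Set.add visited node) acc

def pvFuelA (all_edges : List (String × String)) : Nat :=
  (all_edges.length + 1) * (all_edges.length + 2)

def reconnect_edges_py (kept_ids : List String) (all_edges : List (String × String)) :
    List (String × String) :=
  let succ := pvSuccA all_edges
  PySem.List.sorted2
    (kept_ids.foldl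
      (fun acc src =>
        (pvBfsA succ kept_ids src (pvFuelA all_edges) (succ.getD src []) PySem.Set.empty acc).2)
      PySem.Set.empty)
    Prod.fst Prod.snd

-- ===== PORT B =====
-- succ: dict[str, list[str]]; succ.setdefault(s, []).append(t)
def pvSuccB (all_edges : List (String × String)) : PySem.Dict String (List String) :=
  all_edges.foldl (fun d e => d.modify e.1 [] (fun l => l ++ [e.2])) PySem.Dict.empty

-- extra = {t for d in reach if d not in kept_ids for t in succ.get(d, ())}
def pvExtraB (succ : PySem.Dict String (List String)) (kept_ids : List String)
    (reach : PySem.Set String) : PySem.Set String :=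
  reach.foldl
    (fun e d => if d ∈ kept_ids then e else PySem.Set.update e (succ.getD d []))
    PySem.Set.empty

-- the 'while True:' saturation loop; fuel only makes the recursion structural (never exhausted)
def pvSatB (succ : PySem.Dict String (List String)) (kept_ids : List String) :
    Nat → PySem.Set String → PySem.Set String
  | 0, reach => reach
  | fuel + 1, reach =>
    let extra := pvExtraB succ kept_ids reach
    if PySem.Set.issubset extra reach then reach
    else pvSatB succ kept_ids fuel (PySem.Set.update reach extra)

def reconnect_edges_py_alt (kept_ids : List String) (all_edges : List (String × String)) :
    List (String × String) :=
  let succ := pvSuccB all_edges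
  PySem.List.sorted2
    (kept_ids.foldl
      (fun pairs src =>
        let reach := pvSatB succ kept_ids (all_edges.length + 1)
          (PySem.Set.ofList (succ.getD src []))
        PySem.Set.update pairs
          ((reach.filter (fun t => decide (t ∈ kept_ids ∧ t ≠ src))).map (fun t => (src, t))))
      PySem.Set.empty)
    Prod.fst Prod.snd

-- ===== PRECONDITION & SPEC =====
def Spec_reconnect_edges_py (kept_ids : List String) (all_edges : List (String × String)) (out : List (String × String)) : Prop := out = reconnect_edges_py_alt kept_ids all_edges
instance (kept_ids : List String) (all_edges : List (String × String)) (out : List (String × String)) : Decidable (Spec_reconnect_edges_py kept_ids all_edges out) := by unfold Spec_reconnect_edges_py; infer_instance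

-- ===== CLAIM (what is proved, stated in full; the proofs are below) =====
def Claim_equal_reconnect_edges_py : Prop := ∀ (kept_ids : List String) (all_edges : List (String × String)), Dom_reconnect_edges_py kept_ids all_edges → Spec_reconnect_edges_py kept_ids all_edges (reconnect_edges_py kept_ids all_edges)

-- ===== LEMMAS AND PROOFS =====


lemma pvSuccA_aux (edges : List (String × String)) :
    ∀ (d : PySem.Dict String (PySem.Set String)),
      (∀ n, ((d.getD n [] : PySem.Set String)).Nodup) →
      ∀ n, ((edges.foldl (fun d e => d.modify e.1 [] (fun s => PySem.Set.add s e.2)) d).getD n [] : PySem.Set String).Nodup ∧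
        ∀ t, t ∈ (edges.foldl (fun d e => d.modify e.1 [] (fun s => PySem.Set.add s e.2)) d).getD n [] ↔
          t ∈ d.getD n [] ∨ (n, t) ∈ edges := by
  induction edges with
  | nil => intro d hd n; exact ⟨hd n, fun t => by simp⟩
  | cons e es ih =>
    intro d hd n
    simp only [List.foldl_cons]
    have hd' : ∀ m, (((d.modify e.1 [] (fun s => PySem.Set.add s e.2)).getD m [] : PySem.Set String)).Nodup := by
      intro m
      rw [PySem.Dict.getD_modify]
      split_ifs with h
      · exact PySem.Set.nodup_add _ _ (hd e.1)
      · exact hd m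
    obtain ⟨h1, h2⟩ := ih (d.modify e.1 [] (fun s => PySem.Set.add s e.2)) hd' n
    refine ⟨h1, fun t => ?_⟩
    rw [h2 t, PySem.Dict.getD_modify]
    by_cases h : n = e.1
    · subst h
      simp [PySem.Set.mem_add, Prod.ext_iff]
      tauto
    · simp only [if_neg h]
      simp [Prod.ext_iff]
      tauto

lemma pvSuccA_getD (all_edges : List (String × String)) (n : String) :
    ((pvSuccA all_edges).getD n []).Nodup ∧
      ∀ t, t ∈ (pvSuccA all_edges).getD n [] ↔ (n, t) ∈ all_edges := by
  have := pvSuccA_aux all_edges PySem.Dict.empty (by intro n; simp [PySem.Dict.getD_empty]) n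
  simpa [PySem.Dict.getD_empty] using this

lemma pvSuccB_getD (all_edges : List (String × String)) (n : String) :
    ∀ t, t ∈ (pvSuccB all_edges).getD n [] ↔ (n, t) ∈ all_edges := by
  intro t
  have h := PySem.Dict.getD_foldl_modify_append (l := all_edges) (d := PySem.Dict.empty) (c := n)
  unfold pvSuccB
  rw [h]
  simp only [PySem.Dict.getD_empty, List.nil_append, List.mem_map, List.mem_filter]
  constructor
  · rintro ⟨⟨a, b⟩, ⟨hmem, hbeq⟩, rfl⟩
    simp only [beq_iff_eq] at hbeq; subst hbeq; exact hmem
  · intro hmem; exact ⟨(n, t), ⟨hmem, by simp⟩, rfl⟩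


inductive pvReach (all_edges : List (String × String)) (kept_ids : List String) (src : String) :
    String → Prop
  | base {t} : (src, t) ∈ all_edges → pvReach all_edges kept_ids src t
  | step {d t} : pvReach all_edges kept_ids src d → d ∉ kept_ids → (d, t) ∈ all_edges →
      pvReach all_edges kept_ids src t

lemma pvBfsA_sound (all_edges : List (String × String)) (succ : PySem.Dict String (PySem.Set String))
    (kept_ids : List String) (src : String)
    (hsucc : ∀ n t, t ∈ succ.getD n [] ↔ (n, t) ∈ all_edges) :
    ∀ fuel queue visited acc,
      (∀ x ∈ visited, pvReach all_edges kept_ids src x) →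
      (∀ x ∈ queue, pvReach all_edges kept_ids src x) →
      ∀ x ∈ (pvBfsA succ kept_ids src fuel queue visited acc).1,
        pvReach all_edges kept_ids src x := by
  intro fuel
  induction fuel with
  | zero => intro queue visited acc hv _ x hx; exact hv x hx
  | succ n ih =>
    intro queue visited acc hv hq x hx
    match queue with
    | [] => exact hv x hx
    | node :: rest =>
      have hqr : ∀ y ∈ rest, pvReach all_edges kept_ids src y := fun y hy => hq y (by simp [hy])
      have hnode : pvReach all_edges kept_ids src node := hq node (by simp)
      simp only [pvBfsA] at hx
      by_cases h1 : node ∈ visited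
      · rw [if_pos h1] at hx
        exact ih rest visited acc hv hqr x hx
      · rw [if_neg h1] at hx
        have hv' : ∀ y ∈ PySem.Set.add visited node, pvReach all_edges kept_ids src y := by
          intro y hy
          rcases (PySem.Set.mem_add visited node y).mp hy with h | rfl
          · exact hv y h
          · exact hnode
        by_cases h2 : node ∈ kept_ids
        · rw [if_pos h2] at hx
          exact ih rest _ _ hv' hqr x hx
        · rw [if_neg h2] at hx
          refine ih _ _ _ hv' ?_ x hx
          intro y hy
          rcases List.mem_append.mp hy with h | h
          · exact hqr y h
          · exact pvReach.step hnode h2 ((hsucc node y).mp h)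

lemma pvBfsA_acc (succ : PySem.Dict String (PySem.Set String))
    (kept_ids : List String) (src : String) (Q : String × String → Prop) :
    ∀ fuel queue visited acc,
      (∀ p : String × String, p ∈ acc ↔ Q p ∨ (p.1 = src ∧ p.2 ∈ visited ∧ p.2 ∈ kept_ids ∧ p.2 ≠ src)) →
      ∀ p : String × String,
        p ∈ (pvBfsA succ kept_ids src fuel queue visited acc).2 ↔
          Q p ∨ (p.1 = src ∧ p.2 ∈ (pvBfsA succ kept_ids src fuel queue visited acc).1 ∧
            p.2 ∈ kept_ids ∧ p.2 ≠ src) := by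
  intro fuel
  induction fuel with
  | zero => intro queue visited acc hacc p; simpa [pvBfsA] using hacc p
  | succ n ih =>
    intro queue visited acc hacc p
    match queue with
    | [] => simpa [pvBfsA] using hacc p
    | node :: rest =>
      simp only [pvBfsA]
      by_cases h1 : node ∈ visited
      · rw [if_pos h1]; exact ih rest visited acc hacc p
      · rw [if_neg h1]
        by_cases h2 : node ∈ kept_ids
        · rw [if_pos h2]
          refine ih rest _ _ ?_ p
          intro q
          by_cases h3 : node ≠ src
          · rw [if_pos h3]
            rw [PySem.Set.mem_add, hacc q, PySem.Set.mem_add]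
            constructor
            · rintro (⟨hQ | ⟨hq1, hq2, hq3, hq4⟩⟩ | rfl)
              · exact Or.inl hQ
              · exact Or.inr ⟨hq1, Or.inl hq2, hq3, hq4⟩
              · exact Or.inr ⟨rfl, Or.inr rfl, h2, h3⟩
            · rintro (hQ | ⟨hq1, hq2 | rfl, hq3, hq4⟩)
              · exact Or.inl (Or.inl hQ)
              · exact Or.inl (Or.inr ⟨hq1, hq2, hq3, hq4⟩)
              · exact Or.inr (Prod.ext hq1 rfl)
          · rw [if_neg h3]
            push Not at h3
            rw [hacc q, PySem.Set.mem_add]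
            constructor
            · rintro (hQ | ⟨hq1, hq2, hq3, hq4⟩)
              · exact Or.inl hQ
              · exact Or.inr ⟨hq1, Or.inl hq2, hq3, hq4⟩
            · rintro (hQ | ⟨hq1, hq2 | rfl, hq3, hq4⟩)
              · exact Or.inl hQ
              · exact Or.inr ⟨hq1, hq2, hq3, hq4⟩
              · exact absurd h3 hq4
        · rw [if_neg h2]
          refine ih _ _ _ ?_ p
          intro q
          rw [hacc q, PySem.Set.mem_add]
          constructor
          · rintro (hQ | ⟨hq1, hq2, hq3, hq4⟩)
            · exact Or.inl hQ
            · exact Or.inr ⟨hq1, Or.inl hq2, hq3, hq4⟩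
          · rintro (hQ | ⟨hq1, hq2 | rfl, hq3, hq4⟩)
            · exact Or.inl hQ
            · exact Or.inr ⟨hq1, hq2, hq3, hq4⟩
            · exact absurd hq3 h2

lemma pvBfsA_acc_nodup (succ : PySem.Dict String (PySem.Set String))
    (kept_ids : List String) (src : String) :
    ∀ fuel queue visited acc, acc.Nodup →
      (pvBfsA succ kept_ids src fuel queue visited acc).2.Nodup := by
  intro fuel
  induction fuel with
  | zero => intro _ _ acc h; exact h
  | succ n ih =>
    intro queue visited acc h
    match queue with
    | [] => exact h
    | node :: rest =>
      simp only [pvBfsA]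
      split_ifs with h1 h2 h3
      · exact ih rest visited acc h
      · exact ih _ _ _ (PySem.Set.nodup_add _ _ h)
      · exact ih _ _ _ h
      · exact ih _ _ _ h


lemma pvNodupLen {l₁ l₂ : List String} (h1 : l₁.Nodup) (h2 : ∀ x ∈ l₁, x ∈ l₂) :
    l₁.length ≤ l₂.length := by
  classical
  calc l₁.length = l₁.toFinset.card := (List.toFinset_card_of_nodup h1).symm
    _ ≤ l₂.toFinset.card := Finset.card_le_card (fun x hx => by
        simp only [List.mem_toFinset] at *; exact h2 x hx)
    _ ≤ l₂.length := l₂.toFinset_card_le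

lemma pvBfsA_complete (all_edges : List (String × String))
    (succ : PySem.Dict String (PySem.Set String)) (kept_ids : List String) (src : String)
    (hsucc : ∀ n t, t ∈ succ.getD n [] ↔ (n, t) ∈ all_edges)
    (hnd : ∀ n, ((succ.getD n [] : PySem.Set String)).Nodup) :
    ∀ fuel queue visited acc,
      (∀ x ∈ queue, x ∈ all_edges.map Prod.snd) →
      (queue.length +
        (((all_edges.map Prod.snd).toFinset \ visited.toFinset).card) * (all_edges.length + 1) + 1 ≤ fuel) →
      (∀ d ∈ visited, d ∉ kept_ids → ∀ t ∈ succ.getD d [], t ∈ visited ∨ t ∈ queue) →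
      (∀ x ∈ visited, x ∈ (pvBfsA succ kept_ids src fuel queue visited acc).1) ∧
      (∀ x ∈ queue, x ∈ (pvBfsA succ kept_ids src fuel queue visited acc).1) ∧
      (∀ d ∈ (pvBfsA succ kept_ids src fuel queue visited acc).1, d ∉ kept_ids →
        ∀ t ∈ succ.getD d [], t ∈ (pvBfsA succ kept_ids src fuel queue visited acc).1) := by
  have hsub : ∀ n t, t ∈ succ.getD n [] → t ∈ all_edges.map Prod.snd := by
    intro n t ht
    exact List.mem_map.mpr ⟨(n, t), (hsucc n t).mp ht, rfl⟩
  have hlen : ∀ n, ((succ.getD n [] : PySem.Set String)).length ≤ all_edges.length := by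
    intro n
    have := pvNodupLen (hnd n) (fun x hx => hsub n x hx)
    simpa using this
  intro fuel
  induction fuel with
  | zero => intro queue visited acc _ hfuel _; omega
  | succ n ih =>
    intro queue visited acc hq hfuel hcl
    match queue with
    | [] =>
      refine ⟨fun x hx => hx, by simp, fun d hd hdk t ht => ?_⟩
      rcases hcl d hd hdk t ht with h | h
      · exact h
      · simp at h
    | node :: rest =>
      simp only [pvBfsA]
      by_cases h1 : node ∈ visited
      · rw [if_pos h1]
        have hfuel' : rest.length +
            (((all_edges.map Prod.snd).toFinset \ visited.toFinset).card) * (all_edges.length + 1) + 1 ≤ n := by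
          simp only [List.length_cons] at hfuel; omega
        obtain ⟨C1, C2, C3⟩ := ih rest visited acc (fun x hx => hq x (by simp [hx])) hfuel'
          (by
            intro d hd hdk t ht
            rcases hcl d hd hdk t ht with h | h
            · exact Or.inl h
            · rcases List.mem_cons.mp h with rfl | h
              · exact Or.inl h1
              · exact Or.inr h)
        refine ⟨C1, fun x hx => ?_, C3⟩
        rcases List.mem_cons.mp hx with rfl | hx
        · exact C1 x h1
        · exact C2 x hx
      · rw [if_neg h1]
        -- the unvisited node is a target; the unvisited-target count drops by one
        have hnodeU : node ∈ all_edges.map Prod.snd := hq node (by simp)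
        have hmem : node ∈ (all_edges.map Prod.snd).toFinset \ visited.toFinset := by
          simp [List.mem_toFinset, hnodeU, h1]
        have hvt : (PySem.Set.add visited node).toFinset = insert node visited.toFinset := by
          rw [PySem.Set.add_of_not_mem h1]
          ext y; simp
        have hcard : ((all_edges.map Prod.snd).toFinset \ (PySem.Set.add visited node).toFinset).card + 1 =
            ((all_edges.map Prod.snd).toFinset \ visited.toFinset).card := by
          rw [hvt, Finset.sdiff_insert, Finset.card_erase_of_mem hmem]
          have : 0 < ((all_edges.map Prod.snd).toFinset \ visited.toFinset).card :=
            Finset.card_pos.mpr ⟨node, hmem⟩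
          omega
        have hprod : ((all_edges.map Prod.snd).toFinset \ (PySem.Set.add visited node).toFinset).card * (all_edges.length + 1) + (all_edges.length + 1) =
            ((all_edges.map Prod.snd).toFinset \ visited.toFinset).card * (all_edges.length + 1) := by
          rw [← hcard]; ring
        have hvmem : ∀ y, y ∈ PySem.Set.add visited node ↔ y ∈ visited ∨ y = node :=
          fun y => PySem.Set.mem_add visited node y
        by_cases h2 : node ∈ kept_ids
        · rw [if_pos h2]
          have hfuel' : rest.length +
              (((all_edges.map Prod.snd).toFinset \ (PySem.Set.add visited node).toFinset).card) * (all_edges.length + 1) + 1 ≤ n := by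
            simp only [List.length_cons] at hfuel
            generalize hA : ((all_edges.map Prod.snd).toFinset \ (PySem.Set.add visited node).toFinset).card * (all_edges.length + 1) = A at hprod ⊢
            generalize hB : ((all_edges.map Prod.snd).toFinset \ visited.toFinset).card * (all_edges.length + 1) = B at hprod hfuel
            omega
          obtain ⟨C1, C2, C3⟩ := ih rest (PySem.Set.add visited node)
            (if node ≠ src then PySem.Set.add acc (src, node) else acc)
            (fun x hx => hq x (by simp [hx])) hfuel'
            (by
              intro d hd hdk t ht
              rcases (hvmem d).mp hd with hd | rfl
              · rcases hcl d hd hdk t ht with h | h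
                · exact Or.inl ((hvmem t).mpr (Or.inl h))
                · rcases List.mem_cons.mp h with rfl | h
                  · exact Or.inl ((hvmem t).mpr (Or.inr rfl))
                  · exact Or.inr h
              · exact absurd h2 hdk)
          refine ⟨fun x hx => C1 x ((hvmem x).mpr (Or.inl hx)), fun x hx => ?_, C3⟩
          rcases List.mem_cons.mp hx with rfl | hx
          · exact C1 x ((hvmem x).mpr (Or.inr rfl))
          · exact C2 x hx
        · rw [if_neg h2]
          have hfuel' : (rest ++ succ.getD node []).length +
              (((all_edges.map Prod.snd).toFinset \ (PySem.Set.add visited node).toFinset).card) * (all_edges.length + 1) + 1 ≤ n := by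
            simp only [List.length_cons] at hfuel
            rw [List.length_append]
            have hsl := hlen node
            generalize hA : ((all_edges.map Prod.snd).toFinset \ (PySem.Set.add visited node).toFinset).card * (all_edges.length + 1) = A at hprod ⊢
            generalize hB : ((all_edges.map Prod.snd).toFinset \ visited.toFinset).card * (all_edges.length + 1) = B at hprod hfuel
            omega
          obtain ⟨C1, C2, C3⟩ := ih (rest ++ succ.getD node []) (PySem.Set.add visited node) acc
            (by
              intro x hx
              rcases List.mem_append.mp hx with hx | hx
              · exact hq x (by simp [hx])
              · exact hsub node x hx)
            hfuel'
            (by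
              intro d hd hdk t ht
              rcases (hvmem d).mp hd with hd | rfl
              · rcases hcl d hd hdk t ht with h | h
                · exact Or.inl ((hvmem t).mpr (Or.inl h))
                · rcases List.mem_cons.mp h with rfl | h
                  · exact Or.inl ((hvmem t).mpr (Or.inr rfl))
                  · exact Or.inr (List.mem_append.mpr (Or.inl h))
              · exact Or.inr (List.mem_append.mpr (Or.inr ht)))
          refine ⟨fun x hx => C1 x ((hvmem x).mpr (Or.inl hx)), fun x hx => ?_, C3⟩
          rcases List.mem_cons.mp hx with rfl | hx
          · exact C1 x ((hvmem x).mpr (Or.inr rfl))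
          · exact C2 x (List.mem_append.mpr (Or.inl hx))

lemma pvBfsA_reach_iff (all_edges : List (String × String)) (kept_ids : List String) (src : String)
    (acc : PySem.Set (String × String)) (x : String) :
    x ∈ (pvBfsA (pvSuccA all_edges) kept_ids src (pvFuelA all_edges)
          ((pvSuccA all_edges).getD src []) PySem.Set.empty acc).1 ↔
      pvReach all_edges kept_ids src x := by
  have hsucc : ∀ n t, t ∈ (pvSuccA all_edges).getD n [] ↔ (n, t) ∈ all_edges :=
    fun n => (pvSuccA_getD all_edges n).2
  have hnd : ∀ n, (((pvSuccA all_edges).getD n [] : PySem.Set String)).Nodup :=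
    fun n => (pvSuccA_getD all_edges n).1
  have hsub : ∀ n t, t ∈ (pvSuccA all_edges).getD n [] → t ∈ all_edges.map Prod.snd :=
    fun n t ht => List.mem_map.mpr ⟨(n, t), (hsucc n t).mp ht, rfl⟩
  have hq0 : ∀ y ∈ (pvSuccA all_edges).getD src [], y ∈ all_edges.map Prod.snd :=
    fun y hy => hsub src y hy
  have hfuel : ((pvSuccA all_edges).getD src [] : PySem.Set String).length +
      (((all_edges.map Prod.snd).toFinset \ (PySem.Set.empty : PySem.Set String).toFinset).card) *
        (all_edges.length + 1) + 1 ≤ pvFuelA all_edges := by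
    have h1 : ((pvSuccA all_edges).getD src [] : PySem.Set String).length ≤ all_edges.length := by
      simpa using pvNodupLen (hnd src) (fun y hy => hsub src y hy)
    have h2 : ((all_edges.map Prod.snd).toFinset \ (PySem.Set.empty : PySem.Set String).toFinset).card ≤ all_edges.length := by
      calc ((all_edges.map Prod.snd).toFinset \ (PySem.Set.empty : PySem.Set String).toFinset).card
          ≤ (all_edges.map Prod.snd).toFinset.card := Finset.card_le_card (Finset.sdiff_subset)
        _ ≤ (all_edges.map Prod.snd).length := (all_edges.map Prod.snd).toFinset_card_le
        _ = all_edges.length := List.length_map ..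
    have h3 : ((all_edges.map Prod.snd).toFinset \ (PySem.Set.empty : PySem.Set String).toFinset).card * (all_edges.length + 1) ≤
        all_edges.length * (all_edges.length + 1) := Nat.mul_le_mul_right _ h2
    have h4 : pvFuelA all_edges = all_edges.length * (all_edges.length + 1) + 2 * all_edges.length + 2 := by
      unfold pvFuelA; ring
    generalize hA : ((all_edges.map Prod.snd).toFinset \ (PySem.Set.empty : PySem.Set String).toFinset).card * (all_edges.length + 1) = A at h3 ⊢
    generalize hB : all_edges.length * (all_edges.length + 1) = B at h3 h4
    omega
  constructor
  · intro hx
    refine pvBfsA_sound all_edges (pvSuccA all_edges) kept_ids src hsucc _ _ _ acc ?_ ?_ x hx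
    · intro y hy; simp [PySem.Set.empty] at hy
    · intro y hy; exact pvReach.base ((hsucc src y).mp hy)
  · intro hx
    obtain ⟨C1, C2, C3⟩ := pvBfsA_complete all_edges (pvSuccA all_edges) kept_ids src hsucc hnd
      (pvFuelA all_edges) ((pvSuccA all_edges).getD src []) PySem.Set.empty acc hq0 hfuel
      (by intro d hd; simp [PySem.Set.empty] at hd)
    induction hx with
    | base h => exact C2 _ ((hsucc src _).mpr h)
    | step hd hdk ht ih => exact C3 _ ih hdk _ ((hsucc _ _).mpr ht)

lemma pvExtraB_aux (succ : PySem.Dict String (List String)) (kept_ids : List String) :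
    ∀ (l : List String) (e : PySem.Set String) (t : String),
      t ∈ l.foldl (fun e d => if d ∈ kept_ids then e else PySem.Set.update e (succ.getD d [])) e ↔
        t ∈ e ∨ ∃ d ∈ l, d ∉ kept_ids ∧ t ∈ succ.getD d [] := by
  intro l
  induction l with
  | nil => intro e t; simp
  | cons d ds ih =>
    intro e t
    simp only [List.foldl_cons]
    by_cases h : d ∈ kept_ids
    · rw [if_pos h, ih]
      constructor
      · rintro (h' | ⟨d', hd', hk', ht'⟩)
        · exact Or.inl h'
        · exact Or.inr ⟨d', by simp [hd'], hk', ht'⟩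
      · rintro (h' | ⟨d', hd', hk', ht'⟩)
        · exact Or.inl h'
        · rcases List.mem_cons.mp hd' with rfl | hd'
          · exact absurd h hk'
          · exact Or.inr ⟨d', hd', hk', ht'⟩
    · rw [if_neg h, ih]
      rw [PySem.Set.mem_update]
      constructor
      · rintro ((h' | h') | ⟨d', hd', hk', ht'⟩)
        · exact Or.inl h'
        · exact Or.inr ⟨d, by simp, h, h'⟩
        · exact Or.inr ⟨d', by simp [hd'], hk', ht'⟩
      · rintro (h' | ⟨d', hd', hk', ht'⟩)
        · exact Or.inl (Or.inl h')
        · rcases List.mem_cons.mp hd' with rfl | hd'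
          · exact Or.inl (Or.inr ht')
          · exact Or.inr ⟨d', hd', hk', ht'⟩

lemma pvExtraB_mem (succ : PySem.Dict String (List String)) (kept_ids : List String)
    (reach : PySem.Set String) (t : String) :
    t ∈ pvExtraB succ kept_ids reach ↔
      ∃ d ∈ reach, d ∉ kept_ids ∧ t ∈ succ.getD d [] := by
  unfold pvExtraB
  rw [pvExtraB_aux]
  simp [PySem.Set.empty]


lemma pvSatB_mono (succ : PySem.Dict String (List String)) (kept_ids : List String) :
    ∀ fuel reach x, x ∈ reach → x ∈ pvSatB succ kept_ids fuel reach := by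
  intro fuel
  induction fuel with
  | zero => intro reach x hx; exact hx
  | succ n ih =>
    intro reach x hx
    simp only [pvSatB]
    split_ifs with h
    · exact hx
    · exact ih _ x ((PySem.Set.mem_update _ _ x).mpr (Or.inl hx))

lemma pvSatB_sound (all_edges : List (String × String)) (succ : PySem.Dict String (List String))
    (kept_ids : List String) (src : String)
    (hsucc : ∀ n t, t ∈ succ.getD n [] ↔ (n, t) ∈ all_edges) :
    ∀ fuel reach,
      (∀ x ∈ reach, pvReach all_edges kept_ids src x) →
      ∀ x ∈ pvSatB succ kept_ids fuel reach, pvReach all_edges kept_ids src x := by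
  intro fuel
  induction fuel with
  | zero => intro reach hr x hx; exact hr x hx
  | succ n ih =>
    intro reach hr x hx
    simp only [pvSatB] at hx
    split_ifs at hx with h
    · exact hr x hx
    · refine ih _ ?_ x hx
      intro y hy
      rcases (PySem.Set.mem_update _ _ y).mp hy with hy | hy
      · exact hr y hy
      · obtain ⟨d, hd, hdk, ht⟩ := (pvExtraB_mem succ kept_ids reach y).mp hy
        exact pvReach.step (hr d hd) hdk ((hsucc d y).mp ht)

lemma pvSatB_fix (all_edges : List (String × String)) (succ : PySem.Dict String (List String))
    (kept_ids : List String)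
    (hsucc : ∀ n t, t ∈ succ.getD n [] ↔ (n, t) ∈ all_edges) :
    ∀ fuel reach,
      (∀ x ∈ reach, x ∈ all_edges.map Prod.snd) → reach.Nodup →
      ((all_edges.map Prod.snd).toFinset.card + 1 ≤ fuel + reach.length) →
      ∀ d ∈ pvSatB succ kept_ids fuel reach, d ∉ kept_ids →
        ∀ t ∈ succ.getD d [], t ∈ pvSatB succ kept_ids fuel reach := by
  intro fuel
  induction fuel with
  | zero =>
    intro reach hrU hnd hfuel
    exfalso
    have : reach.length ≤ (all_edges.map Prod.snd).toFinset.card := by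
      calc reach.length = reach.toFinset.card := (List.toFinset_card_of_nodup hnd).symm
        _ ≤ (all_edges.map Prod.snd).toFinset.card := Finset.card_le_card (fun x hx => by
            simp only [List.mem_toFinset] at *; exact hrU x hx)
    omega
  | succ n ih =>
    intro reach hrU hnd hfuel
    simp only [pvSatB]
    by_cases h : PySem.Set.issubset (pvExtraB succ kept_ids reach) reach = true
    · rw [if_pos h]
      intro d hd hdk t ht
      exact (PySem.Set.issubset_iff _ _).mp h t
        ((pvExtraB_mem succ kept_ids reach t).mpr ⟨d, hd, hdk, ht⟩)
    · rw [if_neg h]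
      -- some element of extra is new: the set strictly grows
      have hex : ∃ x ∈ pvExtraB succ kept_ids reach, x ∉ reach := by
        by_contra hc
        push Not at hc
        exact h ((PySem.Set.issubset_iff _ _).mpr hc)
      obtain ⟨x, hxe, hxr⟩ := hex
      have hrU' : ∀ y ∈ PySem.Set.update reach (pvExtraB succ kept_ids reach), y ∈ all_edges.map Prod.snd := by
        intro y hy
        rcases (PySem.Set.mem_update _ _ y).mp hy with hy | hy
        · exact hrU y hy
        · obtain ⟨d, _, _, ht⟩ := (pvExtraB_mem succ kept_ids reach y).mp hy
          exact List.mem_map.mpr ⟨(d, y), (hsucc d y).mp ht, rfl⟩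
      have hnd' := PySem.Set.nodup_update reach (pvExtraB succ kept_ids reach) hnd
      have hgrow : reach.length + 1 ≤ (PySem.Set.update reach (pvExtraB succ kept_ids reach)).length := by
        have hsubf : insert x reach.toFinset ⊆ (PySem.Set.update reach (pvExtraB succ kept_ids reach)).toFinset := by
          intro y hy
          rcases Finset.mem_insert.mp hy with rfl | hy
          · exact List.mem_toFinset.mpr ((PySem.Set.mem_update _ _ y).mpr (Or.inr hxe))
          · exact List.mem_toFinset.mpr ((PySem.Set.mem_update _ _ y).mpr (Or.inl (List.mem_toFinset.mp hy)))
        calc reach.length + 1 = reach.toFinset.card + 1 := by rw [List.toFinset_card_of_nodup hnd]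
          _ = (insert x reach.toFinset).card := (Finset.card_insert_of_notMem (fun hc => hxr (List.mem_toFinset.mp hc))).symm
          _ ≤ (PySem.Set.update reach (pvExtraB succ kept_ids reach)).toFinset.card := Finset.card_le_card hsubf
          _ = (PySem.Set.update reach (pvExtraB succ kept_ids reach)).length := List.toFinset_card_of_nodup hnd'
      exact ih _ hrU' hnd' (by omega)

lemma pvSatB_reach_iff (all_edges : List (String × String)) (kept_ids : List String) (src : String)
    (x : String) :
    x ∈ pvSatB (pvSuccB all_edges) kept_ids (all_edges.length + 1)
        (PySem.Set.ofList ((pvSuccB all_edges).getD src [])) ↔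
      pvReach all_edges kept_ids src x := by
  have hsucc := pvSuccB_getD all_edges
  have hr0 : ∀ y ∈ (PySem.Set.ofList ((pvSuccB all_edges).getD src []) : PySem.Set String), (src, y) ∈ all_edges := by
    intro y hy
    exact (hsucc src y).mp ((PySem.Set.mem_ofList _ y).mp hy)
  constructor
  · intro hx
    refine pvSatB_sound all_edges (pvSuccB all_edges) kept_ids src (fun n t => hsucc n t) _ _ ?_ x hx
    intro y hy; exact pvReach.base (hr0 y hy)
  · intro hx
    have hrU : ∀ y ∈ (PySem.Set.ofList ((pvSuccB all_edges).getD src []) : PySem.Set String), y ∈ all_edges.map Prod.snd :=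
      fun y hy => List.mem_map.mpr ⟨(src, y), hr0 y hy, rfl⟩
    have hfuel : (all_edges.map Prod.snd).toFinset.card + 1 ≤
        (all_edges.length + 1) + (PySem.Set.ofList ((pvSuccB all_edges).getD src []) : PySem.Set String).length := by
      have : (all_edges.map Prod.snd).toFinset.card ≤ all_edges.length := by
        calc (all_edges.map Prod.snd).toFinset.card ≤ (all_edges.map Prod.snd).length :=
              (all_edges.map Prod.snd).toFinset_card_le
          _ = all_edges.length := List.length_map ..
      omega
    have hfix := pvSatB_fix all_edges (pvSuccB all_edges) kept_ids (fun n t => hsucc n t)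
      (all_edges.length + 1) _ hrU (PySem.Set.nodup_ofList _) hfuel
    have hmono := pvSatB_mono (pvSuccB all_edges) kept_ids (all_edges.length + 1)
      (PySem.Set.ofList ((pvSuccB all_edges).getD src []))
    induction hx with
    | base h =>
      exact hmono _ ((PySem.Set.mem_ofList _ _).mpr ((hsucc src _).mpr h))
    | step hd hdk ht ih => exact hfix _ ih hdk _ ((hsucc _ _).mpr ht)

def pvPred (kept_ids : List String) (all_edges : List (String × String)) (p : String × String) : Prop :=
  p.1 ∈ kept_ids ∧ p.2 ∈ kept_ids ∧ p.2 ≠ p.1 ∧ pvReach all_edges kept_ids p.1 p.2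

lemma pvAFold (kept_ids : List String) (all_edges : List (String × String)) :
    ∀ (ks : List String) (acc : PySem.Set (String × String)) (Q : String × String → Prop),
      (∀ p, p ∈ acc ↔ Q p) →
      ∀ p : String × String,
        p ∈ ks.foldl
            (fun acc src =>
              (pvBfsA (pvSuccA all_edges) kept_ids src (pvFuelA all_edges)
                ((pvSuccA all_edges).getD src []) PySem.Set.empty acc).2) acc ↔
          Q p ∨ ∃ s ∈ ks, p.1 = s ∧ p.2 ∈ kept_ids ∧ p.2 ≠ s ∧ pvReach all_edges kept_ids s p.2 := by
  intro ks
  induction ks with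
  | nil => intro acc Q hacc p; simp [hacc p]
  | cons s ks ih =>
    intro acc Q hacc p
    simp only [List.foldl_cons]
    have hacc' : ∀ q : String × String,
        q ∈ (pvBfsA (pvSuccA all_edges) kept_ids s (pvFuelA all_edges)
            ((pvSuccA all_edges).getD s []) PySem.Set.empty acc).2 ↔
          Q q ∨ (q.1 = s ∧ q.2 ∈ kept_ids ∧ q.2 ≠ s ∧ pvReach all_edges kept_ids s q.2) := by
      intro q
      rw [pvBfsA_acc (pvSuccA all_edges) kept_ids s Q (pvFuelA all_edges)
        ((pvSuccA all_edges).getD s []) PySem.Set.empty acc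
        (by intro r; rw [hacc r]; simp [PySem.Set.empty]) q]
      rw [pvBfsA_reach_iff all_edges kept_ids s acc q.2]
      tauto
    rw [ih _ _ hacc' p]
    constructor
    · rintro ((hQ | hs) | ⟨s', hs', h⟩)
      · exact Or.inl hQ
      · exact Or.inr ⟨s, by simp, hs⟩
      · exact Or.inr ⟨s', by simp [hs'], h⟩
    · rintro (hQ | ⟨s', hs', h⟩)
      · exact Or.inl (Or.inl hQ)
      · rcases List.mem_cons.mp hs' with rfl | hs'
        · exact Or.inl (Or.inr h)
        · exact Or.inr ⟨s', hs', h⟩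

lemma pvASet_mem (kept_ids : List String) (all_edges : List (String × String)) (p : String × String) :
    p ∈ (kept_ids.foldl
        (fun acc src =>
          (pvBfsA (pvSuccA all_edges) kept_ids src (pvFuelA all_edges)
            ((pvSuccA all_edges).getD src []) PySem.Set.empty acc).2)
        PySem.Set.empty) ↔ pvPred kept_ids all_edges p := by
  rw [pvAFold kept_ids all_edges kept_ids PySem.Set.empty (fun _ => False)
    (by intro q; simp [PySem.Set.empty]) p]
  unfold pvPred
  constructor
  · rintro (h | ⟨s, hs, rfl, h2, h3, h4⟩)
    · exact absurd h (by simp)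
    · exact ⟨hs, h2, h3, h4⟩
  · rintro ⟨h1, h2, h3, h4⟩
    exact Or.inr ⟨p.1, h1, rfl, h2, h3, h4⟩

lemma pvASet_nodup (kept_ids : List String) (all_edges : List (String × String)) :
    (kept_ids.foldl
        (fun acc src =>
          (pvBfsA (pvSuccA all_edges) kept_ids src (pvFuelA all_edges)
            ((pvSuccA all_edges).getD src []) PySem.Set.empty acc).2)
        PySem.Set.empty).Nodup := by
  have : ∀ (ks : List String) (acc : PySem.Set (String × String)), acc.Nodup →
      (ks.foldl
        (fun acc src =>
          (pvBfsA (pvSuccA all_edges) kept_ids src (pvFuelA all_edges)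
            ((pvSuccA all_edges).getD src []) PySem.Set.empty acc).2) acc).Nodup := by
    intro ks
    induction ks with
    | nil => intro acc h; exact h
    | cons s ks ih =>
      intro acc h
      exact ih _ (pvBfsA_acc_nodup (pvSuccA all_edges) kept_ids s _ _ _ acc h)
  exact this kept_ids PySem.Set.empty (by simp [PySem.Set.empty])

lemma pvBFold (kept_ids : List String) (all_edges : List (String × String)) :
    ∀ (ks : List String) (pairs : PySem.Set (String × String)) (Q : String × String → Prop),
      (∀ p, p ∈ pairs ↔ Q p) →
      ∀ p : String × String,
        p ∈ ks.foldl
            (fun pairs src =>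
              PySem.Set.update pairs
                (((pvSatB (pvSuccB all_edges) kept_ids (all_edges.length + 1)
                    (PySem.Set.ofList ((pvSuccB all_edges).getD src []))).filter
                      (fun t => decide (t ∈ kept_ids ∧ t ≠ src))).map (fun t => (src, t)))) pairs ↔
          Q p ∨ ∃ s ∈ ks, p.1 = s ∧ p.2 ∈ kept_ids ∧ p.2 ≠ s ∧ pvReach all_edges kept_ids s p.2 := by
  intro ks
  induction ks with
  | nil => intro pairs Q hacc p; simp [hacc p]
  | cons s ks ih =>
    intro pairs Q hacc p
    simp only [List.foldl_cons]
    have hacc' : ∀ q : String × String,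
        q ∈ PySem.Set.update pairs
            (((pvSatB (pvSuccB all_edges) kept_ids (all_edges.length + 1)
                (PySem.Set.ofList ((pvSuccB all_edges).getD s []))).filter
                  (fun t => decide (t ∈ kept_ids ∧ t ≠ s))).map (fun t => (s, t))) ↔
          Q q ∨ (q.1 = s ∧ q.2 ∈ kept_ids ∧ q.2 ≠ s ∧ pvReach all_edges kept_ids s q.2) := by
      intro q
      rw [PySem.Set.mem_update, hacc q]
      simp only [List.mem_map, List.mem_filter, decide_eq_true_eq]
      constructor
      · rintro (hQ | ⟨t, ⟨ht, hk, hne⟩, rfl⟩)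
        · exact Or.inl hQ
        · exact Or.inr ⟨rfl, hk, hne, (pvSatB_reach_iff all_edges kept_ids s t).mp ht⟩
      · rintro (hQ | ⟨h1, h2, h3, h4⟩)
        · exact Or.inl hQ
        · refine Or.inr ⟨q.2, ⟨(pvSatB_reach_iff all_edges kept_ids s q.2).mpr h4, h2, h3⟩, ?_⟩
          exact Prod.ext h1.symm rfl
    rw [ih _ _ hacc' p]
    constructor
    · rintro ((hQ | hs) | ⟨s', hs', h⟩)
      · exact Or.inl hQ
      · exact Or.inr ⟨s, by simp, hs⟩
      · exact Or.inr ⟨s', by simp [hs'], h⟩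
    · rintro (hQ | ⟨s', hs', h⟩)
      · exact Or.inl (Or.inl hQ)
      · rcases List.mem_cons.mp hs' with rfl | hs'
        · exact Or.inl (Or.inr h)
        · exact Or.inr ⟨s', hs', h⟩

lemma pvBSet_mem (kept_ids : List String) (all_edges : List (String × String)) (p : String × String) :
    p ∈ (kept_ids.foldl
        (fun pairs src =>
          PySem.Set.update pairs
            (((pvSatB (pvSuccB all_edges) kept_ids (all_edges.length + 1)
                (PySem.Set.ofList ((pvSuccB all_edges).getD src []))).filter
                  (fun t => decide (t ∈ kept_ids ∧ t ≠ src))).map (fun t => (src, t))))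
        PySem.Set.empty) ↔ pvPred kept_ids all_edges p := by
  rw [pvBFold kept_ids all_edges kept_ids PySem.Set.empty (fun _ => False)
    (by intro q; simp [PySem.Set.empty]) p]
  unfold pvPred
  constructor
  · rintro (h | ⟨s, hs, rfl, h2, h3, h4⟩)
    · exact absurd h (by simp)
    · exact ⟨hs, h2, h3, h4⟩
  · rintro ⟨h1, h2, h3, h4⟩
    exact Or.inr ⟨p.1, h1, rfl, h2, h3, h4⟩

lemma pvBSet_nodup (kept_ids : List String) (all_edges : List (String × String)) :
    (kept_ids.foldl
        (fun pairs src =>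
          PySem.Set.update pairs
            (((pvSatB (pvSuccB all_edges) kept_ids (all_edges.length + 1)
                (PySem.Set.ofList ((pvSuccB all_edges).getD src []))).filter
                  (fun t => decide (t ∈ kept_ids ∧ t ≠ src))).map (fun t => (src, t))))
        PySem.Set.empty).Nodup := by
  have : ∀ (ks : List String) (pairs : PySem.Set (String × String)), pairs.Nodup →
      (ks.foldl
        (fun pairs src =>
          PySem.Set.update pairs
            (((pvSatB (pvSuccB all_edges) kept_ids (all_edges.length + 1)
                (PySem.Set.ofList ((pvSuccB all_edges).getD src []))).filter
                  (fun t => decide (t ∈ kept_ids ∧ t ≠ src))).map (fun t => (src, t)))) pairs).Nodup := by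
    intro ks
    induction ks with
    | nil => intro pairs h; exact h
    | cons s ks ih =>
      intro pairs h
      exact ih _ (PySem.Set.nodup_update _ _ h)
  exact this kept_ids PySem.Set.empty (by simp [PySem.Set.empty])

-- Python's tuple order on string pairs, non-strict form
def pvLe (a b : String × String) : Prop := a.1 < b.1 ∨ (a.1 = b.1 ∧ a.2 ≤ b.2)

-- the comparator sorted2 uses, related to pvLe
lemma pvBefore_le (a b : String × String)
    (h : (decide (a.1 < b.1) || (!decide (b.1 < a.1) && decide (a.2 < b.2))) = true) : pvLe a b := by
  simp only [Bool.or_eq_true, Bool.and_eq_true, Bool.not_eq_true', decide_eq_true_eq,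
    decide_eq_false_iff_not] at h
  rcases h with h | ⟨h1, h2⟩
  · exact Or.inl h
  · by_cases hlt : a.1 < b.1
    · exact Or.inl hlt
    · exact Or.inr ⟨le_antisymm (not_lt.mp h1) (not_lt.mp hlt), le_of_lt h2⟩

lemma pvNotBefore_le (a b : String × String)
    (h : ¬ (decide (a.1 < b.1) || (!decide (b.1 < a.1) && decide (a.2 < b.2))) = true) : pvLe b a := by
  simp only [Bool.or_eq_true, Bool.and_eq_true, Bool.not_eq_true', decide_eq_true_eq,
    decide_eq_false_iff_not, not_or, not_and] at h
  obtain ⟨h1, h2⟩ := h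
  by_cases h3 : b.1 < a.1
  · exact Or.inl h3
  · have he : a.1 = b.1 := le_antisymm (not_lt.mp h3) (not_lt.mp h1)
    have h4 : ¬ a.2 < b.2 := by
      intro hc
      exact absurd hc (by simpa [h3] using h2)
    exact Or.inr ⟨he.symm, not_lt.mp h4⟩

lemma pvLe_trans {a b c : String × String} (h1 : pvLe a b) (h2 : pvLe b c) : pvLe a c := by
  rcases h1 with h1 | ⟨h1, h1'⟩ <;> rcases h2 with h2 | ⟨h2, h2'⟩
  · exact Or.inl (lt_trans h1 h2)
  · exact Or.inl (h2 ▸ h1)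
  · exact Or.inl (h1 ▸ h2)
  · exact Or.inr ⟨h1.trans h2, h1'.trans h2'⟩

lemma pvLe_antisymm {a b : String × String} (h1 : pvLe a b) (h2 : pvLe b a) : a = b := by
  rcases h1 with h1 | ⟨h1, h1'⟩ <;> rcases h2 with h2 | ⟨h2, h2'⟩
  · exact absurd h2 (lt_asymm h1)
  · exact absurd h1 (h2 ▸ lt_irrefl _)
  · exact absurd h2 (h1 ▸ lt_irrefl _)
  · exact Prod.ext h1 (le_antisymm h1' h2')

lemma pvInsertBy_pairwise (x : String × String) :
    ∀ (l : List (String × String)), l.Pairwise pvLe →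
      (PySem.List.insertBy
        (fun a b => decide (a.1 < b.1) || (!decide (b.1 < a.1) && decide (a.2 < b.2))) x l).Pairwise pvLe := by
  intro l
  induction l with
  | nil =>
    intro _
    rw [show PySem.List.insertBy
      (fun a b => decide (a.1 < b.1) || (!decide (b.1 < a.1) && decide (a.2 < b.2))) x
      ([] : List (String × String)) = [x] from rfl]
    exact List.pairwise_singleton _ _
  | cons y ys ih =>
    intro hp
    rw [List.pairwise_cons] at hp
    obtain ⟨hy, hys⟩ := hp
    simp only [PySem.List.insertBy]
    by_cases h : (decide (x.1 < y.1) || (!decide (y.1 < x.1) && decide (x.2 < y.2))) = true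
    · rw [if_pos h]
      refine List.pairwise_cons.mpr ⟨?_, List.pairwise_cons.mpr ⟨hy, hys⟩⟩
      intro z hz
      rcases List.mem_cons.mp hz with rfl | hz
      · exact pvBefore_le x z h
      · exact pvLe_trans (pvBefore_le x y h) (hy z hz)
    · rw [if_neg h]
      refine List.pairwise_cons.mpr ⟨?_, ih hys⟩
      intro z hz
      rcases (PySem.List.mem_insertBy _ x z ys).mp hz with hzx | hz
      · exact hzx ▸ pvNotBefore_le x y h
      · exact hy z hz

lemma pvFoldlInsert_pairwise :
    ∀ (xs acc : List (String × String)), acc.Pairwise pvLe →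
      (xs.foldl (fun acc x =>
        PySem.List.insertBy
          (fun a b => decide (a.1 < b.1) || (!decide (b.1 < a.1) && decide (a.2 < b.2))) x acc) acc).Pairwise pvLe := by
  intro xs
  induction xs with
  | nil => intro acc h; exact h
  | cons x xs ih =>
    intro acc h
    exact ih _ (pvInsertBy_pairwise x acc h)

lemma pvSorted2_pairwise (l : List (String × String)) :
    (PySem.List.sorted2 l Prod.fst Prod.snd).Pairwise pvLe := by
  have h : PySem.List.sorted2 l Prod.fst Prod.snd =
      l.foldl (fun acc x =>
        PySem.List.insertBy
          (fun a b => decide (a.1 < b.1) || (!decide (b.1 < a.1) && decide (a.2 < b.2))) x acc) [] := rfl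
  rw [h]
  exact pvFoldlInsert_pairwise l [] (by simp)

lemma pvSorted2_eq_of_perm (l₁ l₂ : List (String × String)) (h : l₁.Perm l₂) :
    PySem.List.sorted2 l₁ Prod.fst Prod.snd = PySem.List.sorted2 l₂ Prod.fst Prod.snd := by
  refine List.eq_of_perm_of_sorted (le := pvLe) ?_ (pvSorted2_pairwise l₁) (pvSorted2_pairwise l₂) ?_
  · intro a b _ _ hab hba; exact pvLe_antisymm hab hba
  · exact ((PySem.List.sorted2_perm l₁ Prod.fst Prod.snd false).trans h).trans
      (PySem.List.sorted2_perm l₂ Prod.fst Prod.snd false).symm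

-- ===== VERDICT (by name: the statement is the Claim_ definition above) =====
theorem reconnect_edges_py_spec : Claim_equal_reconnect_edges_py := by
  intro kept_ids all_edges _
  unfold Spec_reconnect_edges_py reconnect_edges_py reconnect_edges_py_alt
  exact pvSorted2_eq_of_perm _ _
    ((List.perm_ext_iff_of_nodup (pvASet_nodup kept_ids all_edges)
        (pvBSet_nodup kept_ids all_edges)).mpr
      (fun p => (pvASet_mem kept_ids all_edges p).trans (pvBSet_mem kept_ids all_edges p).symm))
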